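-- pv_equiv track=rewrite | github.com/vs-yashwanth/dsa | data_structures/stack/stack_push_pop_verify.py | is_stack_possible
-- ===== SOURCE A (Python) =====
-- def is_stack_possible(string):
--     count = 0
--     for i in string:
--         if i == 'S':
--             count += 1
--         elif i == 'X':
--             count -= 1
--         if count < 0:
--             return False
--     return count == 0
-- ===== SOURCE B (Python) =====
-- def _cancel_once(w):
--     """Return w with the first adjacent 'S','X' pair removed, or None if there is none."""
--     for i in range(len(w) - 1):
--         if w[i] == 'S' and w[i + 1] == 'X':
--             return w[:i] + w[i + 2:]
--     return None
--
-- def is_stack_possible(string):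
--     # Dyck-word reduction: keep only the push/pop letters, then repeatedly
--     # delete an adjacent matched pair 'SX' until none remains.
--     # The sequence is realisable iff everything cancels away.
--     w = [c for c in string if c in ('S', 'X')]
--     while True:
--         r = _cancel_once(w)
--         if r is None:
--             return not w
--         w = r
-- ===== Notes on version B (the rewrite author's own statement) =====
-- stated objective: alternative
-- what changed: Replaces A's running-counter scan with a rewriting algorithm: filter the string to its 'S'/'X' letters and repeatedly delete the first adjacent 'SX' pair until the word is irreducible; the sequence is valid iff the word cancels to empty.
import Mathlib
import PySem

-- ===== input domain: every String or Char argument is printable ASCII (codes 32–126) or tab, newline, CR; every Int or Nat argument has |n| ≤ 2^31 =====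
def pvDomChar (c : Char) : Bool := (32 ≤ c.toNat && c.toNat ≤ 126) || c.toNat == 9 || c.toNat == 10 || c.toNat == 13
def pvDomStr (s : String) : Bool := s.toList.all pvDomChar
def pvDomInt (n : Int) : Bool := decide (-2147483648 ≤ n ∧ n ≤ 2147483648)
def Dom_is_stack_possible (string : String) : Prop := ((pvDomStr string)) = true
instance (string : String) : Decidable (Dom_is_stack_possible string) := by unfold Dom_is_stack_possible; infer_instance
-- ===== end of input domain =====

-- B replaces A's running-counter scan with repeated cancellation of adjacent 'SX' pairs (Dyck-word reduction); alternative algorithm, similar cost.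


-- ===== PORT A =====
-- A's for-loop with early return: count updated per char, bail out as soon as count < 0.
def pvLoopA : List Char → Int → Bool
  | [], count => count == 0
  | i :: rest, count =>
      let count' := if i == 'S' then count + 1 else if i == 'X' then count - 1 else count
      if count' < 0 then false else pvLoopA rest count'

def is_stack_possible (string : String) : Bool := pvLoopA string.toList 0

-- ===== PORT B =====
-- _cancel_once: scan for the first adjacent 'S','X' pair and remove it; none if irreducible.
def pvCancelOnce : List Char → Option (List Char)
  | a :: b :: rest =>
      if a == 'S' && b == 'X' then some rest
      else (pvCancelOnce (b :: rest)).map (fun r => a :: r)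
  | _ => none

theorem pvCancelOnce_length : ∀ {w r : List Char}, pvCancelOnce w = some r → r.length + 2 = w.length := by
  intro w
  induction w with
  | nil => intro r h; simp [pvCancelOnce] at h
  | cons a rest ih =>
      intro r h
      cases rest with
      | nil => simp [pvCancelOnce] at h
      | cons b r2 =>
          simp only [pvCancelOnce] at h
          split at h
          · cases h; simp
          · simp only [Option.map_eq_some_iff] at h
            obtain ⟨r', hr', rfl⟩ := h
            have := ih hr'
            simp at this ⊢
            omega

-- the while-True loop: cancel until irreducible, then 'not w'
def pvReduce (w : List Char) : Bool :=
  match hstep : pvCancelOnce w with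
  | none => w == []
  | some r => pvReduce r
termination_by w.length
decreasing_by have := pvCancelOnce_length hstep; omega

def is_stack_possible_alt (string : String) : Bool :=
  pvReduce (string.toList.filter (fun c => c == 'S' || c == 'X'))

-- ===== PRECONDITION & SPEC =====
def Spec_is_stack_possible (string : String) (out : Bool) : Prop := out = is_stack_possible_alt string
instance (string : String) (out : Bool) : Decidable (Spec_is_stack_possible string out) := by unfold Spec_is_stack_possible; infer_instance

-- ===== CLAIM (what is proved, stated in full; the proofs are below) =====
def Claim_equal_is_stack_possible : Prop := ∀ (string : String), Dom_is_stack_possible string → Spec_is_stack_possible string (is_stack_possible string)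

-- ===== LEMMAS AND PROOFS =====

-- unfolding lemma for one step of A's loop
theorem pvLoopA_cons (x : Char) (l : List Char) (c : Int) :
    pvLoopA (x :: l) c =
      (if (if x == 'S' then c + 1 else if x == 'X' then c - 1 else c) < 0 then false
       else pvLoopA l (if x == 'S' then c + 1 else if x == 'X' then c - 1 else c)) := rfl

-- A's loop ignores characters that are neither 'S' nor 'X' (as long as the count is nonnegative)
theorem pvLoopA_filter : ∀ (l : List Char) (c : Int), 0 ≤ c →
    pvLoopA l c = pvLoopA (l.filter (fun ch => ch == 'S' || ch == 'X')) c := by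
  intro l
  induction l with
  | nil => intro c _; simp
  | cons a rest ih =>
      intro c hc
      rw [List.filter_cons]
      by_cases hmem : (a == 'S' || a == 'X') = true
      · simp only [hmem, if_pos trivial, pvLoopA_cons]
        by_cases hneg : (if a == 'S' then c + 1 else if a == 'X' then c - 1 else c) < 0
        · rw [if_pos hneg, if_pos hneg]
        · rw [if_neg hneg, if_neg hneg, ih _ (not_lt.mp hneg)]
      · have h1 : (a == 'S') = false := by
          cases hs : a == 'S' <;> simp [hs] at hmem ⊢
        have h2 : (a == 'X') = false := by
          cases hs : a == 'X' <;> simp [hs] at hmem ⊢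
        simp only [hmem, Bool.false_eq_true, if_false]
        simp only [pvLoopA_cons, h1, h2, Bool.false_eq_true, if_false, if_neg (not_lt.mpr hc)]
        exact ih c hc

-- one cancellation step preserves the value of A's loop
theorem pvLoopA_cancel : ∀ (w r : List Char) (c : Int), 0 ≤ c →
    pvCancelOnce w = some r → pvLoopA w c = pvLoopA r c := by
  intro w
  induction w with
  | nil => intro r c _ h; simp [pvCancelOnce] at h
  | cons a rest ih =>
      intro r c hc h
      cases rest with
      | nil => simp [pvCancelOnce] at h
      | cons b r2 =>
          simp only [pvCancelOnce] at h
          split at h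
          · rename_i hsx
            simp only [Bool.and_eq_true, beq_iff_eq] at hsx
            cases h
            obtain ⟨rfl, rfl⟩ := hsx
            have e1 : pvLoopA ('S' :: 'X' :: r) c = pvLoopA ('X' :: r) (c + 1) := by
              rw [pvLoopA_cons]
              simp [show ¬ c + 1 < 0 by omega]
            have e2 : pvLoopA ('X' :: r) (c + 1) = pvLoopA r c := by
              rw [pvLoopA_cons]
              simp [show c + 1 - 1 = c by ring, show ¬ c < 0 by omega]
            rw [e1, e2]
          · simp only [Option.map_eq_some_iff] at h
            obtain ⟨r', hr', rfl⟩ := h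
            conv_lhs => rw [pvLoopA_cons]
            conv_rhs => rw [pvLoopA_cons]
            by_cases hneg : (if a == 'S' then c + 1 else if a == 'X' then c - 1 else c) < 0
            · rw [if_pos hneg, if_pos hneg]
            · rw [if_neg hneg, if_neg hneg]
              exact ih _ _ (not_lt.mp hneg) hr'

-- cancellation keeps the word over the alphabet {S, X}
theorem pvCancelOnce_alpha : ∀ {w r : List Char},
    (w.all fun c => c == 'S' || c == 'X') = true → pvCancelOnce w = some r →
    (r.all fun c => c == 'S' || c == 'X') = true := by
  intro w
  induction w with
  | nil => intro r _ h; simp [pvCancelOnce] at h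
  | cons a rest ih =>
      intro r ha h
      cases rest with
      | nil => simp [pvCancelOnce] at h
      | cons b r2 =>
          simp only [pvCancelOnce] at h
          simp only [List.all_cons, Bool.and_eq_true] at ha
          split at h
          · cases h; simp only [List.all_eq_true]; intro x hx
            have := ha.2.2; simp only [List.all_eq_true] at this; exact this x hx
          · simp only [Option.map_eq_some_iff] at h
            obtain ⟨r', hr', rfl⟩ := h
            have hr'' := ih (by simp [ha.2.1, ha.2.2]) hr'
            simp [ha.1, hr'']

-- an irreducible word over {S, X} is X^a ++ S^b
theorem pvIrreducible_shape : ∀ (w : List Char),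
    (w.all fun c => c == 'S' || c == 'X') = true → pvCancelOnce w = none →
    ∃ a b : Nat, w = List.replicate a 'X' ++ List.replicate b 'S' := by
  intro w
  induction w with
  | nil => intro _ _; exact ⟨0, 0, rfl⟩
  | cons x rest ih =>
      intro ha h
      have hx : x = 'S' ∨ x = 'X' := by
        simp only [List.all_cons, Bool.and_eq_true, Bool.or_eq_true, beq_iff_eq] at ha
        exact ha.1
      have ha2 : (rest.all fun c => c == 'S' || c == 'X') = true := by
        simp only [List.all_cons, Bool.and_eq_true] at ha
        exact ha.2
      cases rest with
      | nil =>
          rcases hx with h1 | h1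
          · exact ⟨0, 1, by simp [h1]⟩
          · exact ⟨1, 0, by simp [h1]⟩
      | cons b r2 =>
          simp only [pvCancelOnce] at h
          split at h
          · simp at h
          · rename_i hsx
            simp only [Option.map_eq_none_iff] at h
            obtain ⟨a', b', hab⟩ := ih ha2 h
            rcases hx with h1 | h1
            · -- x = 'S': the next character cannot be 'X', so the tail is all 'S'
              have hb : b = 'S' := by
                have hbx : b = 'S' ∨ b = 'X' := by
                  simp only [List.all_cons, Bool.and_eq_true, Bool.or_eq_true, beq_iff_eq] at ha2
                  exact ha2.1
                rcases hbx with h2 | h2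
                · exact h2
                · exact absurd (by simp [h1, h2]) hsx
              cases a' with
              | zero =>
                  refine ⟨0, b' + 1, ?_⟩
                  simp only [List.replicate, List.nil_append] at hab
                  rw [h1, hab]
                  simp [List.replicate_succ]
              | succ n =>
                  exfalso
                  rw [List.replicate_succ] at hab
                  have : b = 'X' := by
                    have := congrArg List.head? hab
                    simpa using this
                  rw [hb] at this
                  exact absurd this (by decide)
            · refine ⟨a' + 1, b', ?_⟩
              rw [h1, List.replicate_succ, List.cons_append, hab]

theorem pvLoopA_replS : ∀ (b : Nat) (c : Int), 0 ≤ c →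
    pvLoopA (List.replicate b 'S') c = (c + b == 0) := by
  intro b
  induction b with
  | zero => intro c _; simp [pvLoopA]
  | succ n ih =>
      intro c hc
      rw [List.replicate_succ, pvLoopA_cons]
      rw [if_pos (by decide : (('S' : Char) == 'S') = true)]
      rw [if_neg (by omega : ¬ c + 1 < 0), ih _ (by omega)]
      have : c + 1 + (n : Int) = c + ((n : Nat) + 1 : Nat) := by push_cast; ring
      rw [this]

theorem pvLoopA_shape (a b : Nat) :
    pvLoopA (List.replicate a 'X' ++ List.replicate b 'S') 0 = decide (a = 0 ∧ b = 0) := by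
  cases a with
  | zero =>
      simp only [List.replicate, List.nil_append]
      rw [pvLoopA_replS b 0 le_rfl]
      cases b with
      | zero => decide
      | succ n =>
          rw [beq_eq_false_iff_ne.mpr (by omega)]
          simp
  | succ n =>
      rw [List.replicate_succ, List.cons_append, pvLoopA_cons]
      rw [if_neg (by decide : ¬ (('X' : Char) == 'S') = true),
          if_pos (by decide : (('X' : Char) == 'X') = true)]
      rw [if_pos (by omega : (0 : Int) - 1 < 0)]
      simp

-- the reduction loop computes exactly A's verdict on words over {S, X}
theorem pvReduce_eq : ∀ (w : List Char),
    (w.all fun c => c == 'S' || c == 'X') = true → pvReduce w = pvLoopA w 0 := by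
  intro w
  induction w using pvReduce.induct with
  | case1 w h =>
      intro ha
      obtain ⟨a, b, rfl⟩ := pvIrreducible_shape w ha h
      rw [pvReduce, h, pvLoopA_shape]
      cases a <;> cases b <;> simp [List.replicate_succ]
  | case2 w r h ih =>
      intro ha
      rw [pvReduce, h]
      exact (ih (pvCancelOnce_alpha ha h)).trans (pvLoopA_cancel w r 0 le_rfl h).symm

-- ===== VERDICT (by name: the statement is the Claim_ definition above) =====
theorem is_stack_possible_spec : Claim_equal_is_stack_possible := by
  intro s _
  unfold Spec_is_stack_possible is_stack_possible is_stack_possible_alt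
  rw [pvReduce_eq _ ?_, ← pvLoopA_filter _ 0 le_rfl]
  simp only [List.all_eq_true, List.mem_filter]
  exact fun x hx => hx.2
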